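-- pv_equiv track=rewrite | github.com/migo1311/GenomeX | lex1.py | tokenize_code
-- ===== SOURCE A (Python) =====
-- import string
--
-- RESERVED_WORDS = {
--     'act', 'gene', 'dose', 'quant', 'seq', 'allele', 'express',
--     'stimuli', 'if', 'else', 'elif', 'while', 'do', 'for', 'destroy',
--     'contig', 'prod', 'dom', 'rec', 'clust', 'perms', '_G', '_L', 'void'
-- }
--
-- SYMBOLS = {
--     '+': 'Addition', '-': 'Subtraction', '*': 'Multiplication',
--     '/': 'Division', '%': 'Modulo', '(': 'OpenParen', ')': 'CloseParen',
--     '{': 'OpenBrace', '}': 'CloseBrace', '[': 'OpenBracket',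
--     ']': 'CloseBracket', ';': 'Semicolon', '=': 'Assignment',
--     '^': 'Negate', '&&': 'AND', '||': 'OR', '!': 'NOT',
-- }
--
-- ALLOWED_CHARS = string.ascii_letters + string.digits + '_'
--
-- def classify_token(token):
--     # Reserved words
--     if token in RESERVED_WORDS:
--         return f'ReservedWord({token})'
--     # Check if valid identifier
--     elif token[0].isupper() and all(c in ALLOWED_CHARS for c in token) and len(token) <= 20:
--         return 'Identifier'
--     # Check if integer literal
--     elif token.isdigit() or (token.startswith('^') and token[1:].isdigit()):
--         return 'IntegerLiteral'
--     # Check if float literal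
--     elif '.' in token and token.replace('.', '', 1).isdigit():
--         return 'FloatLiteral'
--     # Check if string literal
--     elif token.startswith('"') and token.endswith('"'):
--         return 'StringLiteral'
--     # Symbols
--     elif token in SYMBOLS:
--         return SYMBOLS[token]
--     # Unknown
--     else:
--         return 'Unknown'
--
-- def tokenize_code(code):
--     tokens = []
--     current_token = ''
--     for char in code:
--         if char.isspace() or char in SYMBOLS:
--             if current_token:
--                 tokens.append((current_token, classify_token(current_token)))
--                 current_token = ''
--             if char in SYMBOLS:
--                 tokens.append((char, classify_token(char)))
--         else:
--             current_token += char
--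
--     if current_token:
--         tokens.append((current_token, classify_token(current_token)))
--
--     return tokens
-- ===== SOURCE B (Python) =====
-- import string
--
-- RESERVED_WORDS = {
--     'act', 'gene', 'dose', 'quant', 'seq', 'allele', 'express',
--     'stimuli', 'if', 'else', 'elif', 'while', 'do', 'for', 'destroy',
--     'contig', 'prod', 'dom', 'rec', 'clust', 'perms', '_G', '_L', 'void'
-- }
--
-- SYMBOLS = {
--     '+': 'Addition', '-': 'Subtraction', '*': 'Multiplication',
--     '/': 'Division', '%': 'Modulo', '(': 'OpenParen', ')': 'CloseParen',
--     '{': 'OpenBrace', '}': 'CloseBrace', '[': 'OpenBracket',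
--     ']': 'CloseBracket', ';': 'Semicolon', '=': 'Assignment',
--     '^': 'Negate', '&&': 'AND', '||': 'OR', '!': 'NOT',
-- }
--
-- ALLOWED_CHARS = string.ascii_letters + string.digits + '_'
--
-- # classify_token as an ordered predicate table (first matching rule wins),
-- # falling back to a symbol lookup with 'Unknown' default.
-- CLASSIFIERS = [
--     (lambda t: t in RESERVED_WORDS, lambda t: f'ReservedWord({t})'),
--     (lambda t: t[0].isupper() and all(c in ALLOWED_CHARS for c in t) and len(t) <= 20,
--      lambda t: 'Identifier'),
--     (lambda t: t.isdigit() or (t.startswith('^') and t[1:].isdigit()),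
--      lambda t: 'IntegerLiteral'),
--     (lambda t: '.' in t and t.replace('.', '', 1).isdigit(),
--      lambda t: 'FloatLiteral'),
--     (lambda t: t.startswith('"') and t.endswith('"'),
--      lambda t: 'StringLiteral'),
-- ]
--
-- def classify_token(token):
--     for pred, label in CLASSIFIERS:
--         if pred(token):
--             return label(token)
--     return SYMBOLS.get(token, 'Unknown')
--
-- def tokenize_code(code):
--     # Maximal-munch scanner: at each position emit a symbol, skip whitespace,
--     # or slice out the longest run of ordinary characters as one word.
--     tokens = []
--     i, n = 0, len(code)
--     while i < n:
--         c = code[i]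
--         if c in SYMBOLS:
--             tokens.append((c, classify_token(c)))
--             i += 1
--         elif c.isspace():
--             i += 1
--         else:
--             j = i + 1
--             while j < n and not (code[j] in SYMBOLS or code[j].isspace()):
--                 j += 1
--             word = code[i:j]
--             tokens.append((word, classify_token(word)))
--             i = j
--     return tokens
-- ===== Notes on version B (the rewrite author's own statement) =====
-- stated objective: alternative
-- what changed: Replaces A's char-by-char accumulator state machine with a maximal-munch scanner that slices out the longest run of ordinary characters per step, and replaces the if-chain classifier with an ordered (predicate, label) rule table scanned for the first match.
import Mathlib
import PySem

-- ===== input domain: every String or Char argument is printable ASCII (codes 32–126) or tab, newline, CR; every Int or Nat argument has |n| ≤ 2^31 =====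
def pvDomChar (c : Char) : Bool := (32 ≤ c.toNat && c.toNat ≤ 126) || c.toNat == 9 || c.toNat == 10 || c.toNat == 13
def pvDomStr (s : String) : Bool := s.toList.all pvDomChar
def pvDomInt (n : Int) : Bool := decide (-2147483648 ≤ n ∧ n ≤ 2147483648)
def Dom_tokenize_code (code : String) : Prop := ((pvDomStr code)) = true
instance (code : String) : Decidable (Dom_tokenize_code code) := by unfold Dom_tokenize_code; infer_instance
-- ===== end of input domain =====

set_option maxHeartbeats 1600000


-- B replaces A's char-by-char accumulator state machine by a maximal-munch scanner (emit symbol / skip space /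
-- slice the longest ordinary-character run in one step) with a table-driven classifier (alternative decomposition, same cost).
-- Tokens are handled as List Char internally (Lean's own String ops are kernel-opaque).

-- ===== PORT A =====
-- `char in SYMBOLS`: only the length-1 keys can equal a single character ('&&', '||' never match a char)
def pvIsSym (c : Char) : Bool :=
  ['+', '-', '*', '/', '%', '(', ')', '{', '}', '[', ']', ';', '=', '^', '!'].contains c

-- the full SYMBOLS dict, for `token in SYMBOLS` / `SYMBOLS[token]` inside classify_token
def pvSymTable : List (List Char × String) :=
  [(['+'], "Addition"), (['-'], "Subtraction"), (['*'], "Multiplication"),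
   (['/'], "Division"), (['%'], "Modulo"), (['('], "OpenParen"), ([')'], "CloseParen"),
   (['{'], "OpenBrace"), (['}'], "CloseBrace"), (['['], "OpenBracket"),
   ([']'], "CloseBracket"), ([';'], "Semicolon"), (['='], "Assignment"),
   (['^'], "Negate"), (['&','&'], "AND"), (['|','|'], "OR"), (['!'], "NOT")]

def pvReserved : List (List Char) :=
  [['a','c','t'], ['g','e','n','e'], ['d','o','s','e'], ['q','u','a','n','t'],
   ['s','e','q'], ['a','l','l','e','l','e'], ['e','x','p','r','e','s','s'],
   ['s','t','i','m','u','l','i'], ['i','f'], ['e','l','s','e'], ['e','l','i','f'],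
   ['w','h','i','l','e'], ['d','o'], ['f','o','r'], ['d','e','s','t','r','o','y'],
   ['c','o','n','t','i','g'], ['p','r','o','d'], ['d','o','m'], ['r','e','c'],
   ['c','l','u','s','t'], ['p','e','r','m','s'], ['_','G'], ['_','L'], ['v','o','i','d']]

-- c in ALLOWED_CHARS = ascii_letters + digits + '_' (exact: membership by code point)
def pvAllowed (c : Char) : Bool :=
  ('a' ≤ c && c ≤ 'z') || ('A' ≤ c && c ≤ 'Z') || ('0' ≤ c && c ≤ '9') || c == '_'

-- classify_token, transliterated branch for branch on the token's character list.
-- token[0] is only reached on nonempty tokens in both programs (headD is irrelevant for []).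
def pvClassify (cs : List Char) : String :=
  if pvReserved.contains cs then
    "ReservedWord(" ++ String.ofList cs ++ ")"
  else if PySem.Chars.isupper (cs.headD ' ') && cs.all pvAllowed && decide (cs.length ≤ 20) then
    "Identifier"
  else if PySem.Chars.strIsdigit cs ||
          (cs.head? == some '^' && PySem.Chars.strIsdigit cs.tail) then
    "IntegerLiteral"
  else if cs.contains '.' && PySem.Chars.strIsdigit (cs.erase '.') then
    "FloatLiteral"
  else if cs.head? == some '"' && cs.getLast? == some '"' then
    "StringLiteral"
  else
    match pvSymTable.find? (fun p => p.1 == cs) with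
    | some p => p.2
    | none => "Unknown"

def pvTok (cs : List Char) : String × String := (String.ofList cs, pvClassify cs)

def pvStepA (st : List (String × String) × List Char) (c : Char) :
    List (String × String) × List Char :=
  if PySem.Chars.isspace c || pvIsSym c then
    let t1 := if st.2.isEmpty then st.1 else st.1 ++ [pvTok st.2]
    let t2 := if pvIsSym c then t1 ++ [pvTok [c]] else t1
    (t2, [])
  else (st.1, st.2 ++ [c])

def tokenize_code (code : String) : List (String × String) :=
  let st := code.toList.foldl pvStepA ([], [])
  if st.2.isEmpty then st.1 else st.1 ++ [pvTok st.2]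

-- ===== PORT B =====
-- B's own spellings of the module tables and character tests
def pvIsSymB (c : Char) : Bool :=
  c == '+' || c == '-' || c == '*' || c == '/' || c == '%' || c == '(' || c == ')' ||
  c == '{' || c == '}' || c == '[' || c == ']' || c == ';' || c == '=' || c == '^' || c == '!'

def pvAllowedB (c : Char) : Bool := c.isAlphanum || c == '_'

def pvReservedB : List (List Char) :=
  ["act".toList, "gene".toList, "dose".toList, "quant".toList, "seq".toList,
   "allele".toList, "express".toList, "stimuli".toList, "if".toList, "else".toList,
   "elif".toList, "while".toList, "do".toList, "for".toList, "destroy".toList,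
   "contig".toList, "prod".toList, "dom".toList, "rec".toList, "clust".toList,
   "perms".toList, "_G".toList, "_L".toList, "void".toList]

def pvSymTableB : List (List Char × String) :=
  [("+".toList, "Addition"), ("-".toList, "Subtraction"), ("*".toList, "Multiplication"),
   ("/".toList, "Division"), ("%".toList, "Modulo"), ("(".toList, "OpenParen"),
   (")".toList, "CloseParen"), ("{".toList, "OpenBrace"), ("}".toList, "CloseBrace"),
   ("[".toList, "OpenBracket"), ("]".toList, "CloseBracket"), (";".toList, "Semicolon"),
   ("=".toList, "Assignment"), ("^".toList, "Negate"), ("&&".toList, "AND"),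
   ("||".toList, "OR"), ("!".toList, "NOT")]

-- CLASSIFIERS: ordered (predicate, label) table; first match wins
def pvClassifiersB : List ((List Char → Bool) × (List Char → String)) :=
  [(fun t => pvReservedB.contains t,
    fun t => "ReservedWord(" ++ String.ofList t ++ ")"),
   (fun t => PySem.Chars.isupper (t.headD ' ') && t.all pvAllowedB && decide (t.length ≤ 20),
    fun _ => "Identifier"),
   (fun t => PySem.Chars.strIsdigit t || (t.head? == some '^' && PySem.Chars.strIsdigit t.tail),
    fun _ => "IntegerLiteral"),
   (fun t => t.contains '.' && PySem.Chars.strIsdigit (t.erase '.'),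
    fun _ => "FloatLiteral"),
   (fun t => t.head? == some '"' && t.getLast? == some '"',
    fun _ => "StringLiteral")]

-- for pred, label in CLASSIFIERS: …  /  return SYMBOLS.get(token, 'Unknown')
def pvClassifyB (cs : List Char) : String :=
  match pvClassifiersB.find? (fun p => p.1 cs) with
  | some p => p.2 cs
  | none => ((pvSymTableB.find? (fun p => p.1 == cs)).map Prod.snd).getD "Unknown"

-- the maximal-munch scanner (the while-loop over the index i, as recursion on the remaining suffix)
def pvScanB : List Char → List (String × String)
  | [] => []
  | c :: rest =>
    if pvIsSymB c then
      (String.ofList [c], pvClassifyB [c]) :: pvScanB rest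
    else if PySem.Chars.isspace c then
      pvScanB rest
    else
      -- inner while loop: extend j over ordinary characters; word = code[i:j]
      let word := c :: rest.takeWhile (fun d => !(pvIsSymB d || PySem.Chars.isspace d))
      (String.ofList word, pvClassifyB word) ::
        pvScanB (rest.dropWhile (fun d => !(pvIsSymB d || PySem.Chars.isspace d)))
termination_by cs => cs.length
decreasing_by
  · simp
  · simp
  · simp only [List.length_cons]
    exact Nat.lt_succ_of_le (List.length_dropWhile_le _ _)

def tokenize_code_alt (code : String) : List (String × String) :=
  pvScanB code.toList

-- ===== PRECONDITION & SPEC =====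
def Spec_tokenize_code (code : String) (out : List (String × String)) : Prop := out = tokenize_code_alt code
instance (code : String) (out : List (String × String)) : Decidable (Spec_tokenize_code code out) := by unfold Spec_tokenize_code; infer_instance

-- ===== CLAIM (what is proved, stated in full; the proofs are below) =====
def Claim_equal_tokenize_code : Prop := ∀ (code : String), Dom_tokenize_code code → Spec_tokenize_code code (tokenize_code code)

-- ===== LEMMAS AND PROOFS =====

theorem pvIsSymB_eq : pvIsSymB = pvIsSym := by
  funext c
  rw [Bool.eq_iff_iff]
  simp [pvIsSym, pvIsSymB]
  tauto

theorem pvAllowedB_eq : pvAllowedB = pvAllowed := by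
  funext c
  rw [Bool.eq_iff_iff]
  simp [pvAllowed, pvAllowedB, Char.isAlphanum, Char.isAlpha, Char.isDigit,
    Char.isUpper, Char.isLower, Char.le_def]
  tauto

theorem pvReservedB_eq : pvReservedB = pvReserved := by decide

theorem pvSymTableB_eq : pvSymTableB = pvSymTable := by decide

theorem pvClassifyB_eq : ∀ cs, pvClassifyB cs = pvClassify cs := by
  intro cs
  unfold pvClassifyB pvClassifiersB pvClassify
  rw [pvReservedB_eq, pvSymTableB_eq, pvAllowedB_eq]
  simp only [List.find?]
  cases h1 : pvReserved.contains cs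
  · cases h2 : PySem.Chars.isupper (cs.headD ' ') && cs.all pvAllowed && decide (cs.length ≤ 20)
    · cases h3 : PySem.Chars.strIsdigit cs || (cs.head? == some '^' && PySem.Chars.strIsdigit cs.tail)
      · cases h4 : cs.contains '.' && PySem.Chars.strIsdigit (cs.erase '.')
        · cases h5 : cs.head? == some '"' && cs.getLast? == some '"'
          · simp only [h1, h2, h3, h4, h5, Bool.false_eq_true, if_false]
            cases hf : pvSymTable.find? (fun p => p.1 == cs) <;> simp [hf]
          · simp only [h1, h2, h3, h4, h5, Bool.false_eq_true, if_false, if_true]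
        · simp only [h1, h2, h3, h4, Bool.false_eq_true, if_false, if_true]
      · simp only [h1, h2, h3, Bool.false_eq_true, if_false, if_true]
    · simp only [h1, h2, Bool.false_eq_true, if_false, if_true]
  · simp only [h1, if_true]

-- non-delimiter characters (the word characters)
def pvND (c : Char) : Bool := !(pvIsSym c || PySem.Chars.isspace c)

theorem pv_takeWhile_all {p : Char → Bool} : ∀ (l r : List Char), l.all p = true →
    (l ++ r).takeWhile p = l ++ r.takeWhile p := by
  intro l r h
  induction l with
  | nil => simp
  | cons a l ih =>
    simp only [List.all_cons, Bool.and_eq_true] at h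
    simp [List.takeWhile_cons, h.1, ih h.2]

theorem pv_dropWhile_all {p : Char → Bool} : ∀ (l r : List Char), l.all p = true →
    (l ++ r).dropWhile p = r.dropWhile p := by
  intro l r h
  induction l with
  | nil => simp
  | cons a l ih =>
    simp only [List.all_cons, Bool.and_eq_true] at h
    simp [List.dropWhile_cons, h.1, ih h.2]

-- pvScanB unfolding on a symbol and on a space
theorem pv_scan_sym (c : Char) (rest : List Char) (h : pvIsSym c = true) :
    pvScanB (c :: rest) = pvTok [c] :: pvScanB rest := by
  rw [pvScanB.eq_2]
  simp [pvIsSymB_eq, h, pvTok, pvClassifyB_eq]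

theorem pv_scan_space (c : Char) (rest : List Char) (hs : PySem.Chars.isspace c = true)
    (h : pvIsSym c = false) : pvScanB (c :: rest) = pvScanB rest := by
  rw [pvScanB.eq_2]
  simp [pvIsSymB_eq, h, hs]

-- pvScanB munches a maximal word: nonempty, all word chars, followed by a delimiter (or nothing)
theorem pv_scan_word (c : Char) (w rest : List Char) (hw : (c :: w).all pvND = true)
    (hr : rest = [] ∨ ∃ d t, rest = d :: t ∧ pvND d = false) :
    pvScanB ((c :: w) ++ rest) = pvTok (c :: w) :: pvScanB rest := by
  simp only [List.all_cons, Bool.and_eq_true] at hw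
  have hc : pvIsSym c = false ∧ PySem.Chars.isspace c = false := by
    have := hw.1; simp [pvND] at this; exact this
  have htw : rest.takeWhile pvND = [] ∧ rest.dropWhile pvND = rest := by
    rcases hr with rfl | ⟨d, t, rfl, hd⟩
    · simp
    · simp [List.takeWhile_cons, List.dropWhile_cons, hd]
  have hnd : (fun d => !(pvIsSymB d || PySem.Chars.isspace d)) = pvND := by
    funext d; simp [pvND, pvIsSymB_eq]
  rw [List.cons_append, pvScanB.eq_2, hnd]
  simp only [pvIsSymB_eq, hc.1, hc.2, Bool.false_eq_true, if_false,
    pv_takeWhile_all w rest hw.2, pv_dropWhile_all w rest hw.2, htw.1, htw.2]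
  simp [pvTok, pvClassifyB_eq]

-- flush of A's final state
def pvFlush (st : List (String × String) × List Char) : List (String × String) :=
  if st.2.isEmpty then st.1 else st.1 ++ [pvTok st.2]

-- the central invariant: A's fold with pending word `cur` (all word chars) equals B's scan of cur ++ rest
theorem pv_loop_eq : ∀ (cs cur : List Char) (T : List (String × String)),
    cur.all pvND = true →
    pvFlush (cs.foldl pvStepA (T, cur)) = T ++ pvScanB (cur ++ cs) := by
  intro cs
  induction cs with
  | nil =>
    intro cur T h
    cases cur with
    | nil => simp [pvFlush, pvScanB]
    | cons c w =>
      have hw := pv_scan_word c w [] h (Or.inl rfl)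
      simp only [List.append_nil] at hw ⊢
      rw [hw, pvScanB.eq_1]
      simp [pvFlush]
  | cons c rest ih =>
    intro cur T h
    simp only [List.foldl_cons]
    cases hsym : pvIsSym c
    · cases hsp : PySem.Chars.isspace c
      · -- ordinary character: extend the pending word
        have hstep : pvStepA (T, cur) c = (T, cur ++ [c]) := by
          simp [pvStepA, hsym, hsp]
        rw [hstep, ih (cur ++ [c]) T (by simp [List.all_append, h, pvND, hsym, hsp])]
        simp
      · -- whitespace: flush the pending word
        have hstep : pvStepA (T, cur) c =
            ((if cur.isEmpty then T else T ++ [pvTok cur]), []) := by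
          simp [pvStepA, hsym, hsp]
        rw [hstep, ih [] _ (by simp)]
        cases cur with
        | nil => simp [pv_scan_space c rest hsp hsym]
        | cons a w =>
          have hw := pv_scan_word a w (c :: rest) h
            (Or.inr ⟨c, rest, rfl, by simp [pvND, hsp]⟩)
          simp only [List.cons_append] at hw ⊢
          rw [hw, pv_scan_space c rest hsp hsym]
          simp
    · -- symbol: flush the pending word, then emit the symbol token
      have hstep : pvStepA (T, cur) c =
          ((if cur.isEmpty then T else T ++ [pvTok cur]) ++ [pvTok [c]], []) := by
        simp [pvStepA, hsym]
      rw [hstep, ih [] _ (by simp)]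
      cases cur with
      | nil => simp [pv_scan_sym c rest hsym]
      | cons a w =>
        have hw := pv_scan_word a w (c :: rest) h
          (Or.inr ⟨c, rest, rfl, by simp [pvND, hsym]⟩)
        simp only [List.cons_append] at hw ⊢
        rw [hw, pv_scan_sym c rest hsym]
        simp

-- ===== VERDICT (by name: the statement is the Claim_ definition above) =====
theorem tokenize_code_spec : Claim_equal_tokenize_code := by
  intro code _
  unfold Spec_tokenize_code tokenize_code tokenize_code_alt
  have := pv_loop_eq code.toList [] [] (by simp)
  simpa [pvFlush] using this
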